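-- pv_equiv track=rewrite | github.com/facilisdes/assertions_detection | features/lexicFeatures.py | getPunctuantionRatings
-- ===== SOURCE A (Python) =====
-- def getPunctuantionRatings(message):
--     """
--     проверка на наличие и размещение определенных знаков пунктуации в тексте сообщения
--     :param message: текст сообщения
--     :type message: str
--     :return: результат проверки в виде массива
--     :rtype: list
--     """
--
--     result = list()
--     marks = {
--         '!' : {
--             'count': message.count('!'),
--             'repeatedness': False
--         },
--         '?' : {
--             'count': message.count('?'),
--             'repeatedness': False
--         }
--     }
--     marks = ['!', '?']
--
--     for mark in marks:
--         markCount = message.count(mark)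
--         repeatedness = False
--
--         if markCount > 0:
--             if markCount < 3:
--                 # на один или два знака ставим признак, равный 1
--                 markCount = 1
--             else:
--                 # на три и более ставим 2
--                 markCount = 2
--
--             if mark*2 in message:
--                 # считаем, есть ли что-то вроде "!!!!!" в тексте
--                 repeatedness = True
--
--         # представление результата в виде булевого вектора
--         marksResult = [False] * 3
--         for mark in range(markCount+1):
--             marksResult[mark] = True
--
--         result.append(repeatedness)
--         result.extend(marksResult)
--
--     return result
-- ===== SOURCE B (Python) =====
-- def getPunctuantionRatings(message):
--     # Single left-to-right pass with an accumulator: character counts and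
--     # adjacent-repetition flags for '!' and '?' are maintained together,
--     # then the eight booleans are emitted from the final state.
--     cBang = 0
--     cQues = 0
--     dBang = False
--     dQues = False
--     prev = ''
--     for ch in message:
--         if ch == '!':
--             cBang += 1
--             if prev == '!':
--                 dBang = True
--         elif ch == '?':
--             cQues += 1
--             if prev == '?':
--                 dQues = True
--         prev = ch
--     return [dBang, True, cBang > 0, cBang >= 3,
--             dQues, True, cQues > 0, cQues >= 3]
-- ===== Notes on version B (the rewrite author's own statement) =====
-- stated objective: alternative
-- what changed: Replaces A's per-mark loop with repeated message.count/substring scans and a prefix-fill boolean bucket by one single left-to-right pass over the message maintaining both counts and adjacent-repetition flags in an accumulator, emitting the eight booleans from the final state.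
import Mathlib
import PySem

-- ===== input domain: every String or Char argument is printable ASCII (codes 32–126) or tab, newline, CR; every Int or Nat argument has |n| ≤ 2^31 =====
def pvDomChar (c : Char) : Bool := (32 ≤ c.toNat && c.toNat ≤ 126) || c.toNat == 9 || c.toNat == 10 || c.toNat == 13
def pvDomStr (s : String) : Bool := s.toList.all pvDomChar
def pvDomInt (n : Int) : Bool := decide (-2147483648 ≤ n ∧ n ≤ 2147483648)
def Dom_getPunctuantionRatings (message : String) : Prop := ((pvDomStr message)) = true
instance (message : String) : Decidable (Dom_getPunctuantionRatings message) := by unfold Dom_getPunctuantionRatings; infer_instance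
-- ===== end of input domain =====

-- B replaces A's per-mark loop with repeated count/substring scans by one single
-- left-to-right pass maintaining counts and adjacent-repetition flags (alternative).

-- ===== PORT A =====
-- One iteration of A's outer loop. A's initial dict literal is built and immediately
-- shadowed by the list ['!','?'] without ever being read, so it has no effect on the result.
-- The inner `marksResult[mark] = True` assignment always has 0 ≤ mark ≤ 2 < 3 (markCount
-- was bucketed to 0/1/2), so List.set is exact for Python's in-range list assignment.
def pvABlock (s : List Char) (mark : Char) : List Bool :=
  let markCount := PySem.Chars.count s [mark]
  let repeatedness := false
  let st :=
    if markCount > 0 then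
      ((if markCount < 3 then 1 else 2),
       if PySem.Chars.isIn [mark, mark] s then true else repeatedness)
    else (markCount, repeatedness)
  let marksResult := [false, false, false]
  let marksResult := (PySem.List.pyRange 0 ((st.1 : Int) + 1) 1).foldl
      (fun acc i => acc.set i.toNat true) marksResult
  st.2 :: marksResult

def getPunctuantionRatings (message : String) : List Bool :=
  ['!', '?'].foldl (fun result mark => result ++ pvABlock message.toList mark) []

-- ===== PORT B =====
-- Python's `prev = ''` (no previous character yet) is ported as `none`; `prev == '!'`
-- is `prev == some '!'` (the empty string never equals a one-character mark).
def pvBStep (st : Int × Int × Bool × Bool × Option Char) (ch : Char) :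
    Int × Int × Bool × Bool × Option Char :=
  let (cB, cQ, dB, dQ, prev) := st
  if ch = '!' then (cB + 1, cQ, dB || (prev == some '!'), dQ, some ch)
  else if ch = '?' then (cB, cQ + 1, dB, dQ || (prev == some '?'), some ch)
  else (cB, cQ, dB, dQ, some ch)

def getPunctuantionRatings_alt (message : String) : List Bool :=
  let st := message.toList.foldl pvBStep (0, 0, false, false, none)
  [st.2.2.1, true, decide (st.1 > 0), decide (st.1 ≥ 3),
   st.2.2.2.1, true, decide (st.2.1 > 0), decide (st.2.1 ≥ 3)]

-- ===== PRECONDITION & SPEC =====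
def Spec_getPunctuantionRatings (message : String) (out : List Bool) : Prop := out = getPunctuantionRatings_alt message
instance (message : String) (out : List Bool) : Decidable (Spec_getPunctuantionRatings message out) := by unfold Spec_getPunctuantionRatings; infer_instance

-- ===== CLAIM (what is proved, stated in full; the proofs are below) =====
def Claim_equal_getPunctuantionRatings : Prop := ∀ (message : String), Dom_getPunctuantionRatings message → Spec_getPunctuantionRatings message (getPunctuantionRatings message)

-- ===== LEMMAS AND PROOFS =====

-- single-character substring count is element count
theorem pvCount_go_single (m : Char) (s : List Char) (fuel acc : Nat) (h : s.length ≤ fuel) :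
    PySem.Chars.count.go [m] fuel s acc = acc + s.count m := by
  induction s generalizing fuel acc with
  | nil => cases fuel <;> simp [PySem.Chars.count.go]
  | cons x t ih =>
    cases fuel with
    | zero => simp at h
    | succ f =>
      simp only [PySem.Chars.count.go]
      by_cases hx : x = m
      · subst hx
        simp only [List.isPrefixOf, BEq.rfl, Bool.true_and, if_pos, List.length_singleton,
          List.drop_one, List.tail_cons]
        rw [ih f (acc + 1) (by simpa using Nat.le_of_succ_le_succ h)]
        simp; omega
      · have hp : [m].isPrefixOf (x :: t) = false := by
          simp [List.isPrefixOf]; exact fun hmx => absurd hmx.symm hx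
        rw [hp]
        simp only [Bool.false_eq_true, if_false]
        rw [ih f acc (by simpa using Nat.le_of_succ_le_succ h)]
        simp [hx]

theorem pvCount_single (m : Char) (s : List Char) :
    PySem.Chars.count s [m] = s.count m := by
  simp [PySem.Chars.count, pvCount_go_single m s s.length 0 le_rfl]

-- a doubled mark in the message implies the mark occurs at all
theorem pvIsIn_double_count_pos (m : Char) (s : List Char)
    (h : PySem.Chars.isIn [m, m] s = true) : 0 < PySem.Chars.count s [m] := by
  rw [pvCount_single, List.count_pos_iff]
  have hinf : [m, m] <:+: s := (PySem.Chars.isIn_iff_infix _ _).1 h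
  exact hinf.subset (by simp)

-- A's block equals the four booleans [doubled, true, count>0, count≥3]
theorem pvBlock_eq (s : List Char) (m : Char) :
    pvABlock s m = [PySem.Chars.isIn [m, m] s, true,
      decide (PySem.Chars.count s [m] > 0), decide (PySem.Chars.count s [m] ≥ 3)] := by
  unfold pvABlock
  by_cases hc : 0 < PySem.Chars.count s [m]
  · by_cases h3 : PySem.Chars.count s [m] < 3
    · have hn3 : ¬ 3 ≤ PySem.Chars.count s [m] := by omega
      cases hin : PySem.Chars.isIn [m, m] s <;>
        simp [hc, h3, hn3, PySem.List.pyRange, List.range_succ]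
    · have hy3 : 3 ≤ PySem.Chars.count s [m] := by omega
      cases hin : PySem.Chars.isIn [m, m] s <;>
        simp [hc, h3, hy3, PySem.List.pyRange, List.range_succ]
  · have hin : PySem.Chars.isIn [m, m] s = false := by
      cases hh : PySem.Chars.isIn [m, m] s
      · rfl
      · exact absurd (pvIsIn_double_count_pos m s hh) hc
    have hc0 : PySem.Chars.count s [m] = 0 := by omega
    simp [hc0, hin, PySem.List.pyRange, List.range_succ]

-- specification of B's doubled flag relative to a previous character
def pvDbl (m : Char) : Option Char → List Char → Bool
  | _, [] => false
  | p, c :: t => (p == some m && c == m) || pvDbl m (some c) t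

def pvLastO : Option Char → List Char → Option Char
  | p, [] => p
  | _, c :: t => pvLastO (some c) t

theorem pvFold_inv (s : List Char) (cB cQ : Int) (dB dQ : Bool) (p : Option Char) :
    s.foldl pvBStep (cB, cQ, dB, dQ, p) =
      (cB + s.count '!', cQ + s.count '?',
       dB || pvDbl '!' p s, dQ || pvDbl '?' p s, pvLastO p s) := by
  induction s generalizing cB cQ dB dQ p with
  | nil => simp [pvDbl, pvLastO]
  | cons c t ih =>
    by_cases hB : c = '!'
    · subst hB
      simp [pvBStep, List.foldl_cons, ih, pvDbl, pvLastO, Bool.or_assoc]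
      omega
    · by_cases hQ : c = '?'
      · subst hQ
        simp [pvBStep, List.foldl_cons, ih, pvDbl, pvLastO, hB, Bool.or_assoc]
        omega
      · have h1 : (c == '!') = false := by simp [hB]
        have h2 : (c == '?') = false := by simp [hQ]
        simp [pvBStep, List.foldl_cons, ih, pvDbl, pvLastO, hB, hQ, h1, h2]

theorem pvDbl_iff_infix (m : Char) (s : List Char) (p : Option Char) :
    pvDbl m p s = true ↔ [m, m] <:+: (p.toList ++ s) := by
  induction s generalizing p with
  | nil =>
    simp only [pvDbl, List.append_nil]
    constructor
    · intro h; simp at h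
    · intro h
      have := h.length_le
      cases p <;> simp at this
  | cons c t ih =>
    have ihc := ih (some c)
    cases p with
    | none => simpa [pvDbl] using ihc
    | some x =>
      simp only [pvDbl, Option.toList, List.cons_append, List.nil_append,
        Bool.or_eq_true, Bool.and_eq_true, beq_iff_eq, Option.some.injEq] at *
      rw [List.infix_cons_iff, ihc]
      constructor
      · rintro (⟨hx, hc⟩ | h)
        · exact Or.inl (by simp [hx, hc, List.cons_prefix_cons])
        · exact Or.inr h
      · rintro (h | h)
        · rw [List.cons_prefix_cons] at h
          obtain ⟨hx, h2⟩ := h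
          rw [List.cons_prefix_cons] at h2
          exact Or.inl ⟨hx.symm, h2.1.symm⟩
        · exact Or.inr h

theorem pvDbl_eq_isIn (m : Char) (s : List Char) :
    pvDbl m none s = PySem.Chars.isIn [m, m] s := by
  cases h : PySem.Chars.isIn [m, m] s
  · rw [PySem.Chars.isIn_eq_false_iff] at h
    cases hd : pvDbl m none s
    · rfl
    · exact absurd (by simpa using (pvDbl_iff_infix m s none).1 hd) h
  · exact (pvDbl_iff_infix m s none).2 (by simpa using (PySem.Chars.isIn_iff_infix _ _).1 h)

-- ===== VERDICT (by name: the statement is the Claim_ definition above) =====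
theorem getPunctuantionRatings_spec : Claim_equal_getPunctuantionRatings := by
  intro message _
  unfold Spec_getPunctuantionRatings getPunctuantionRatings getPunctuantionRatings_alt
  rw [pvFold_inv]
  simp [pvBlock_eq, pvCount_single, pvDbl_eq_isIn]
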